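-- pv_equiv track=rewrite | github.com/usera2tt/utils | time_/time_util.py | _time_ago_format
-- ===== SOURCE A (Python) =====
-- formatter = [
--     # 과거, 미래
--     ['방금', '곧'],  # 10s
--     ['{}초 전', '{}초 후'],  # 60
--     ['{}분 전', '{}분 후'],  # 60 ~ 3600
--     ['{}시간 전', '{}시간 후'],  # 3600 ~ 3600 * 24
--     ['{}일 전', '{}일 후'],  # 3600 * 24 ~
--     # ['{}주일 전', '{}주일 후'],
--     # ['1개월 전', '1개월 후'],
--     # ['{}개월 전', '{}개월 후'],
--     # ['1년 전', '1년 후'],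
--     # ['{}년 전', '{}년 후']
-- ]
--
-- def _time_ago_format(diff_sec, is_past):
--     criteria = [10, 60, 3600, 3600 * 24]
--     divide_by = [1, 1, 60, 3600, 3600 * 24]
--
--     diff_sec = abs(diff_sec)
--     for idx, value in enumerate(criteria):
--         if diff_sec < value:
--             return formatter[idx][is_past].format(int(diff_sec / divide_by[idx]))
--     return formatter[-1][is_past].format(int(diff_sec / divide_by[-1]))
-- ===== SOURCE B (Python) =====
-- import bisect
--
-- formatter = [
--     ['방금', '곧'],
--     ['{}초 전', '{}초 후'],
--     ['{}분 전', '{}분 후'],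
--     ['{}시간 전', '{}시간 후'],
--     ['{}일 전', '{}일 후'],
-- ]
--
-- _CRITERIA = [10, 60, 3600, 3600 * 24]
-- _DIVIDE_BY = [1, 1, 60, 3600, 3600 * 24]
--
-- def _time_ago_format(diff_sec, is_past):
--     d = abs(diff_sec)
--     idx = bisect.bisect_right(_CRITERIA, d)
--     return formatter[idx][is_past].format(int(d / _DIVIDE_BY[idx]))
-- ===== Notes on version B (the rewrite author's own statement) =====
-- stated objective: idiomatic
-- what changed: Replaces the enumerate-loop with an early return and a separate fall-through case by a single bisect.bisect_right lookup into the bucket table, so there is no loop and no special last-bucket branch.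
import Mathlib
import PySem

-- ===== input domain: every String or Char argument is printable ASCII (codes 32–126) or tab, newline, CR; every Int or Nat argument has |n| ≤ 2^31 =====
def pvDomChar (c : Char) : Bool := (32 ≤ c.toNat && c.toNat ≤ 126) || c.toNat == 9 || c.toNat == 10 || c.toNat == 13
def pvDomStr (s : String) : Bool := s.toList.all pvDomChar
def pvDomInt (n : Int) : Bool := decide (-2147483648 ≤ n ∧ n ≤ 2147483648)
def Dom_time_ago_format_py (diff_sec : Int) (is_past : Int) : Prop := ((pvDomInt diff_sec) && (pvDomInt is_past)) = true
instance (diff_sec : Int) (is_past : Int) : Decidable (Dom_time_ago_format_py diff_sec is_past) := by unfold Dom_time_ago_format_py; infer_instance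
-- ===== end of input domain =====

-- B replaces A's enumerate-loop over the bucket thresholds by a single bisect_right lookup (idiomatic, loop-free).


-- ===== PORT A =====
-- Port of A (`_time_ago_format`). `int(d / divide_by[idx])` is ported as PySem.Int.truncdiv
-- (= int(a / b), exact for |a|,|b| < 2^53; |diff_sec| ≤ 2^31 on Dom).
def pvFormatter : List (List String) :=
  [["방금", "곧"],
   ["{}초 전", "{}초 후"],
   ["{}분 전", "{}분 후"],
   ["{}시간 전", "{}시간 후"],
   ["{}일 전", "{}일 후"]]

-- `.format(n)` on these templates: replace the single "{}" placeholder by str(n)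
def pvFmt (s : String) (n : Int) : String := PySem.Str.replace s "{}" (PySem.Int.toStr n)

-- A's `for idx, value in enumerate(criteria)` loop with its early return and fall-through
def pvALoop (d : Int) (is_past : Int) (divide_by : List Int) : List (Int × Int) → String
  | [] => pvFmt (PySem.List.pyGetD (PySem.List.pyGetD pvFormatter (-1) []) is_past "")
            (PySem.Int.truncdiv d (PySem.List.pyGetD divide_by (-1) 1))
  | (idx, value) :: rest =>
      if d < value then
        pvFmt (PySem.List.pyGetD (PySem.List.pyGetD pvFormatter idx []) is_past "")
          (PySem.Int.truncdiv d (PySem.List.pyGetD divide_by idx 1))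
      else pvALoop d is_past divide_by rest

def time_ago_format_py (diff_sec : Int) (is_past : Int) : String :=
  let criteria : List Int := [10, 60, 3600, 3600 * 24]
  let divide_by : List Int := [1, 1, 60, 3600, 3600 * 24]
  let d := |diff_sec|
  pvALoop d is_past divide_by (PySem.List.enumerate criteria)

-- ===== PORT B =====
-- Port of B: one bisect.bisect_right lookup (PySem.List.bisectRight), no loop, no special last bucket.
def time_ago_format_py_alt (diff_sec : Int) (is_past : Int) : String :=
  let criteria : List Int := [10, 60, 3600, 3600 * 24]
  let divide_by : List Int := [1, 1, 60, 3600, 3600 * 24]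
  let d := |diff_sec|
  let idx : Int := PySem.List.bisectRight criteria d
  pvFmt (PySem.List.pyGetD (PySem.List.pyGetD pvFormatter idx []) is_past "")
    (PySem.Int.truncdiv d (PySem.List.pyGetD divide_by idx 1))

-- ===== PRECONDITION & SPEC =====
-- Pre_ excludes is_past outside {-2,-1,0,1}: there `formatter[idx][is_past]` raises IndexError in A
-- (and in B alike). Inside, including Python's negative-index values -1 and -2, A returns and B matches.
def Pre_time_ago_format_py (diff_sec : Int) (is_past : Int) : Prop := -2 ≤ is_past ∧ is_past ≤ 1
instance (diff_sec : Int) (is_past : Int) : Decidable (Pre_time_ago_format_py diff_sec is_past) := by unfold Pre_time_ago_format_py; infer_instance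
def pvWitness_time_ago_format_py : Int × Int := (75, 0)

def Spec_time_ago_format_py (diff_sec : Int) (is_past : Int) (out : String) : Prop := out = time_ago_format_py_alt diff_sec is_past
instance (diff_sec : Int) (is_past : Int) (out : String) : Decidable (Spec_time_ago_format_py diff_sec is_past out) := by unfold Spec_time_ago_format_py; infer_instance

-- ===== CLAIM (what is proved, stated in full; the proofs are below) =====
def Claim_equal_time_ago_format_py : Prop := ∀ (diff_sec : Int) (is_past : Int), Dom_time_ago_format_py diff_sec is_past → Pre_time_ago_format_py diff_sec is_past → Spec_time_ago_format_py diff_sec is_past (time_ago_format_py diff_sec is_past)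

-- ===== LEMMAS AND PROOFS =====

-- ===== VERDICT (by name: the statement is the Claim_ definition above) =====
theorem time_ago_format_py_spec : Claim_equal_time_ago_format_py := by
  intro diff_sec is_past _ hpre
  unfold Spec_time_ago_format_py
  simp only [time_ago_format_py, time_ago_format_py_alt]
  set d := |diff_sec| with hd
  by_cases h1 : d < 10
  · have c60 : d < 60 := by omega
    have c3600 : d < 3600 := by omega
    simp [pvALoop, PySem.List.enumerate, PySem.List.bisectRight, PySem.List.bisectRightLoop,
      PySem.List.pyGetD, h1, c60, c3600]
  · by_cases h2 : d < 60
    · have c3600 : d < 3600 := by omega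
      simp [pvALoop, PySem.List.enumerate, PySem.List.bisectRight, PySem.List.bisectRightLoop,
        PySem.List.pyGetD, h1, h2, c3600]
    · by_cases h3 : d < 3600
      · simp [pvALoop, PySem.List.enumerate, PySem.List.bisectRight, PySem.List.bisectRightLoop,
          PySem.List.pyGetD, h1, h2, h3]
      · by_cases h4 : d < 86400
        · simp [pvALoop, PySem.List.enumerate, PySem.List.bisectRight, PySem.List.bisectRightLoop,
            PySem.List.pyGetD, PySem.List.pyGet?, PySem.List.pyIdx?, pvFormatter, h1, h2, h3, h4]
        · simp [pvALoop, PySem.List.enumerate, PySem.List.bisectRight, PySem.List.bisectRightLoop,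
            PySem.List.pyGetD, PySem.List.pyGet?, PySem.List.pyIdx?, pvFormatter, h1, h2, h3, h4]
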